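-- pv_equiv track=rewrite | github.com/polirritmico/codesignal_solutions | Python/Intro/digitDegree.py | solution
-- ===== SOURCE A (Python) =====
-- def solution(number):
--     if number < 10:
--         return 0
--     # Got two or more digits, so already one digit degree:
--     digit_degree = 1
--     # number to list of integers:
--     digit_list = [int(digit) for digit in str(number)]
--     digit_sum = sum(digit_list)
--     # Recursive call. If digit_sum is < 10 then we get the
--     # base case in the recursion:
--     digit_degree += solution(digit_sum)
--     return digit_degree
-- ===== SOURCE B (Python) =====
-- def solution(number):
--     count = 0
--     while number >= 10:
--         s = 0
--         while number > 0:
--             s += number % 10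
--             number //= 10
--         number = s
--         count += 1
--     return count
-- ===== Notes on version B (the rewrite author's own statement) =====
-- stated objective: alternative
-- what changed: Replaces A's recursion over a string conversion (summing int(d) for d in str(number)) with an iterative outer loop that keeps the iteration count in a loop variable and an inner loop extracting digits arithmetically with modulo and floor division by ten.
import Mathlib
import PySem

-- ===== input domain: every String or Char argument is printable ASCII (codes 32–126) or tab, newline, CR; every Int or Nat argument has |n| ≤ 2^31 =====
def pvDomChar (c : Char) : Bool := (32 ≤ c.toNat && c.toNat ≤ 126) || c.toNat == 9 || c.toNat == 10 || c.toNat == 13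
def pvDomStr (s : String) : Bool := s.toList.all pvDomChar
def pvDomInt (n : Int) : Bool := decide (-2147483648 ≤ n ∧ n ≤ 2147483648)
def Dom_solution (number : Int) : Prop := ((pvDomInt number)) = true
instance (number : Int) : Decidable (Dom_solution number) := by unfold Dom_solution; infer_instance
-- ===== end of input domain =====

-- B replaces A's recursion over str(number) with an iterative loop extracting digits arithmetically (modulo and floor division by ten), counting iterations in a loop variable.


-- ===== PORT A =====
-- The recursion is carried by a fuel argument (number.toNat + 1 suffices, since the digit sum
-- strictly decreases — proved below in pv_digits_sum_lt / pvDsum_lt); the fuel is only a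
-- totality guard, the branch structure is A's.
-- int(digit) on a single char is ported as (PySem.Int.ofChars? [c]).getD 0 — exact here: for
-- number ≥ 10 every character of str(number) is a decimal digit, so int() never raises.
def solutionFuel : Nat → Int → Int
  | 0, _ => 0
  | f + 1, number =>
    if number < 10 then 0
    else
      -- digit_degree = 1; digit_sum = sum(digit_list); digit_degree += solution(digit_sum)
      1 + solutionFuel f (((PySem.Int.toChars number).map
          (fun c => (PySem.Int.ofChars? [c]).getD 0)).sum)

def solution (number : Int) : Int := solutionFuel (number.toNat + 1) number

-- ===== PORT B =====
-- inner while-loop: while number > 0: s += number % 10; number //= 10   (fuel = totality guard)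
def solutionAltSum : Nat → Int → Int → Int
  | 0, _, s => s
  | f + 1, number, s =>
    if 0 < number then
      solutionAltSum f (PySem.Int.floordiv number 10) (s + PySem.Int.mod number 10)
    else s

-- outer while-loop: while number >= 10: number = <arithmetic digit sum>; count += 1
def solutionAltGo : Nat → Int → Int → Int
  | 0, _, count => count
  | f + 1, number, count =>
    if 10 ≤ number then
      solutionAltGo f (solutionAltSum (number.toNat + 1) number 0) (count + 1)
    else count

def solution_alt (number : Int) : Int := solutionAltGo (number.toNat + 1) number 0

-- ===== PRECONDITION & SPEC =====
def Spec_solution (number : Int) (out : Int) : Prop := out = solution_alt number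
instance (number : Int) (out : Int) : Decidable (Spec_solution number out) := by unfold Spec_solution; infer_instance

-- ===== CLAIM (what is proved, stated in full; the proofs are below) =====
def Claim_equal_solution : Prop := ∀ (number : Int), Dom_solution number → Spec_solution number (solution number)

-- ===== LEMMAS AND PROOFS =====

lemma pv_val_digitChar (d : Nat) (h : d < 10) :
    (PySem.Int.ofChars? [Nat.digitChar d]).getD 0 = (d : Int) := by
  interval_cases d <;> decide

lemma pv_digits_sum_le (m : Nat) : (Nat.digits 10 m).sum ≤ m := by
  induction m using Nat.strong_induction_on with
  | _ m ih =>
    rcases Nat.eq_zero_or_pos m with h | h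
    · simp [h]
    · rw [Nat.digits_def' (by omega : 1 < 10) h]
      have h1 : m / 10 < m := Nat.div_lt_self h (by omega)
      have := ih (m / 10) h1
      simp only [List.sum_cons]
      omega

lemma pv_digits_sum_lt (m : Nat) (h : 10 ≤ m) : (Nat.digits 10 m).sum < m := by
  rw [Nat.digits_def' (by omega : 1 < 10) (by omega)]
  have h1 : m / 10 < m := Nat.div_lt_self (by omega) (by omega)
  have h2 := pv_digits_sum_le (m / 10)
  have h3 := Nat.div_add_mod m 10
  have h4 : 1 ≤ m / 10 := Nat.one_le_div_iff (by omega) |>.mpr h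
  simp only [List.sum_cons]
  omega

lemma pv_core_sum : ∀ (f n : Nat) (l : List Char), n < f →
    ((Nat.toDigitsCore 10 f n l).map (fun c => (PySem.Int.ofChars? [c]).getD 0)).sum
      = ((Nat.digits 10 n).sum : Int)
        + ((l.map (fun c => (PySem.Int.ofChars? [c]).getD 0)).sum) := by
  intro f
  induction f with
  | zero => intro n l h; omega
  | succ f ih =>
    intro n l h
    rw [Nat.toDigitsCore]
    by_cases h0 : n / 10 = 0
    · simp only [h0]
      have hn : n < 10 := by omega
      have hmod : n % 10 = n := Nat.mod_eq_of_lt hn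
      rcases Nat.eq_zero_or_pos n with hz | hp
      · subst hz; simp [pv_val_digitChar 0 (by omega)]
      · rw [Nat.digits_def' (by omega : 1 < 10) hp, h0, hmod]
        simp [pv_val_digitChar n hn]
    · simp only [if_neg h0]
      have hp : 0 < n := by
        rcases Nat.eq_zero_or_pos n with hz | hp
        · subst hz; simp at h0
        · exact hp
      have hlt : n / 10 < f := by
        have := Nat.div_lt_self hp (by omega : 1 < 10)
        omega
      rw [ih (n / 10) _ hlt]
      rw [Nat.digits_def' (by omega : 1 < 10) hp]
      simp [pv_val_digitChar (n % 10) (Nat.mod_lt _ (by omega))]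
      omega

-- str-based digit sum (A's) equals the base-10 digit sum.
lemma pv_strsum_eq (n : Int) (h : 0 ≤ n) :
    ((PySem.Int.toChars n).map (fun c => (PySem.Int.ofChars? [c]).getD 0)).sum
      = ((Nat.digits 10 n.toNat).sum : Int) := by
  have hneg : ¬ n < 0 := by omega
  simp only [PySem.Int.toChars, if_neg hneg, Nat.toDigits]
  rw [pv_core_sum (n.toNat + 1) n.toNat [] (by omega)]
  simp

lemma pvDsum_lt (n : Int) (h : 10 ≤ n) :
    (((PySem.Int.toChars n).map (fun c => (PySem.Int.ofChars? [c]).getD 0)).sum).toNat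
      < n.toNat := by
  rw [pv_strsum_eq n (by omega)]
  have := pv_digits_sum_lt n.toNat (by omega)
  omega

-- the arithmetic digit sum (B's inner loop, seeded with enough fuel) equals it too.
lemma pv_asum_eq : ∀ (f : Nat) (m : Nat) (s : Int), m < f →
    solutionAltSum f (m : Int) s = s + ((Nat.digits 10 m).sum : Int) := by
  intro f
  induction f with
  | zero => intro m s h; omega
  | succ f ih =>
    intro m s h
    rw [solutionAltSum]
    rcases Nat.eq_zero_or_pos m with hz | hp
    · subst hz; simp
    · rw [if_pos (by exact_mod_cast hp)]
      have hd : PySem.Int.floordiv (m : Int) 10 = ((m / 10 : Nat) : Int) := by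
        exact_mod_cast PySem.Int.floordiv_natCast m 10
      have hm : PySem.Int.mod (m : Int) 10 = ((m % 10 : Nat) : Int) := by
        exact_mod_cast PySem.Int.mod_natCast m 10
      have hlt : m / 10 < f := by
        have := Nat.div_lt_self hp (by omega : 1 < 10)
        omega
      rw [hd, hm, ih (m / 10) _ hlt]
      rw [Nat.digits_def' (by omega : 1 < 10) hp]
      simp only [List.sum_cons]
      push_cast
      ring

-- both digit-sum computations agree on any n ≥ 0
lemma pv_sums_agree (n : Int) (h : 0 ≤ n) :
    solutionAltSum (n.toNat + 1) n 0
      = ((PySem.Int.toChars n).map (fun c => (PySem.Int.ofChars? [c]).getD 0)).sum := by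
  have hn : n = ((n.toNat : Nat) : Int) := by omega
  rw [pv_strsum_eq n h]
  conv_lhs => rw [hn]
  rw [Int.toNat_natCast, pv_asum_eq (n.toNat + 1) n.toNat 0 (by omega), zero_add]

-- Loop invariant: with enough fuel, B's outer loop computes count + A's recursive digit degree.
lemma pv_go_eq : ∀ (f : Nat) (n c : Int), n.toNat < f →
    solutionAltGo f n c = c + solutionFuel f n := by
  intro f
  induction f with
  | zero => intro n c h; omega
  | succ f ih =>
    intro n c h
    rw [solutionAltGo, solutionFuel]
    by_cases h10 : 10 ≤ n
    · rw [if_pos h10, if_neg (by omega), pv_sums_agree n (by omega)]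
      have hlt := pvDsum_lt n h10
      rw [ih _ (c + 1) (by omega)]
      ring
    · rw [if_neg h10, if_pos (by omega), add_zero]

-- ===== VERDICT (by name: the statement is the Claim_ definition above) =====
theorem solution_spec : Claim_equal_solution := by
  intro number _
  unfold Spec_solution solution_alt solution
  rw [pv_go_eq (number.toNat + 1) number 0 (by omega), zero_add]
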